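-- pv_equiv track=rewrite | github.com/ying122141/Website-Development | programming/DP.py | coefficientShift
-- ===== SOURCE A (Python) =====
-- def coefficientShift(arr):
--
--     arr.sort(reverse=True)
--     if arr[0] <= 0 : return 0
--
--     j = 0
--     while j < len(arr) and arr[j] > 0:
--         j += 1
--
--     max_sum = arr[0]
--
--     m = len(arr)
--
--     for i in range(j, m + 1):
--
--         temp_sum = 0
--
--         for k in range(1, i+1):
--
--             t = (i-k+1) * arr[k-1]
--             temp_sum += t
--
--         if temp_sum > max_sum:
--             max_sum = temp_sum
--
--     return max_sum
-- ===== SOURCE B (Python) =====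
-- def coefficientShift(arr):
--     # Note: like A, this sorts arr in place (observable mutation).
--     arr.sort(reverse=True)
--     if arr[0] <= 0:
--         return 0
--     m = len(arr)
--     j = m
--     for idx, v in enumerate(arr):
--         if v <= 0:
--             j = idx
--             break
--     best = arr[0]
--     p = 0  # prefix sum arr[0..i-1]
--     w = 0  # weighted sum k*arr[k-1] for k=1..i
--     for i in range(1, m + 1):
--         p += arr[i - 1]
--         w += i * arr[i - 1]
--         if i >= j:
--             s = (i + 1) * p - w
--             if s > best:
--                 best = s
--     return best
-- ===== Notes on version B (the rewrite author's own statement) =====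
-- stated objective: faster
-- what changed: B evaluates each candidate weighted sum S(i) in O(1) from running prefix sums p and w via S(i) = (i+1)*p - w, replacing A's inner loop that recomputes S(i) from scratch for every i.
import Mathlib
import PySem

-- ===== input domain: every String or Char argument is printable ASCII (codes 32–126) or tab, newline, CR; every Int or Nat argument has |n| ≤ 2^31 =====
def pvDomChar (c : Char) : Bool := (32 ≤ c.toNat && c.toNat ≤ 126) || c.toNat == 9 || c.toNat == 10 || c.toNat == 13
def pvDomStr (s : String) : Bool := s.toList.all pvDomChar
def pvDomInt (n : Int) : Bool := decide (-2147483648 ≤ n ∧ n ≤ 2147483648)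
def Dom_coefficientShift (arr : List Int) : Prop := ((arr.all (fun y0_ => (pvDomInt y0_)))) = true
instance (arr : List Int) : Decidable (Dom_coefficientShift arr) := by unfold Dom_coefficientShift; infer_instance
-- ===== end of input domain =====

-- B replaces A's O(m^2) rescan of every prefix by running prefix sums (S(i) = (i+1)*p - w), for speed.
-- Note: both A and B sort the argument list in place (same mutation); the equivalence proved is about the return value.

-- ===== PORT A =====
-- A's `while j < len(arr) and arr[j] > 0: j += 1`
def pvWhileJ (a : List Int) (j : Nat) : Nat :=
  if h : j < a.length then
    if PySem.List.pyGetD a (j : Int) 0 > 0 then pvWhileJ a (j + 1) else j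
  else j
termination_by a.length - j
decreasing_by omega

def coefficientShift (arr : List Int) : Int :=
  let a := PySem.List.sorted arr (fun x => x) true
  match PySem.List.pyGet? a 0 with
  | none => 0  -- IndexError on the empty list: excluded by Pre_
  | some a0 =>
    if a0 ≤ 0 then 0
    else
      let j := pvWhileJ a 0
      let m := a.length
      (PySem.List.pyRange (j : Int) ((m : Int) + 1) 1).foldl
        (fun max_sum i =>
          let temp_sum := (PySem.List.pyRange 1 (i + 1) 1).foldl
            (fun s k => s + (i - k + 1) * PySem.List.pyGetD a (k - 1) 0) 0
          if temp_sum > max_sum then temp_sum else max_sum) a0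

-- ===== PORT B =====
-- B's `for idx, v in enumerate(arr): if v <= 0: j = idx; break` (j initialised to m)
def pvFindJ (l : List Int) (idx m : Nat) : Nat :=
  match l with
  | [] => m
  | v :: rest => if v ≤ 0 then idx else pvFindJ rest (idx + 1) m

def coefficientShift_alt (arr : List Int) : Int :=
  let a := PySem.List.sorted arr (fun x => x) true
  match PySem.List.pyGet? a 0 with
  | none => 0  -- IndexError on the empty list: excluded by Pre_
  | some a0 =>
    if a0 ≤ 0 then 0
    else
      let m := a.length
      let j := pvFindJ a 0 m
      let r := (PySem.List.pyRange 1 ((m : Int) + 1) 1).foldl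
        (fun st i =>
          let v := PySem.List.pyGetD a (i - 1) 0
          let p := st.1 + v
          let w := st.2.1 + i * v
          let best :=
            if i ≥ (j : Int) then
              (if (i + 1) * p - w > st.2.2 then (i + 1) * p - w else st.2.2)
            else st.2.2
          (p, w, best)) ((0 : Int), (0 : Int), a0)
      r.2.2

-- ===== PRECONDITION & SPEC =====
-- A raises IndexError (arr[0]) on the empty list; everything else is admitted.
def Pre_coefficientShift (arr : List Int) : Prop := arr ≠ []
instance (arr : List Int) : Decidable (Pre_coefficientShift arr) := by unfold Pre_coefficientShift; infer_instance
def pvWitness_coefficientShift : List Int := ([3, -1, 2])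

def Spec_coefficientShift (arr : List Int) (out : Int) : Prop := out = coefficientShift_alt arr
instance (arr : List Int) (out : Int) : Decidable (Spec_coefficientShift arr out) := by unfold Spec_coefficientShift; infer_instance

-- ===== CLAIM (what is proved, stated in full; the proofs are below) =====
def Claim_equal_coefficientShift : Prop := ∀ (arr : List Int), Dom_coefficientShift arr → Pre_coefficientShift arr → Spec_coefficientShift arr (coefficientShift arr)

-- ===== LEMMAS AND PROOFS =====

-- prefix sum and weighted prefix sum of the first n elements
def pvP (a : List Int) (n : Nat) : Int := (a.take n).sum
def pvW (a : List Int) (n : Nat) : Int :=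
  (List.range n).foldl (fun (s : Int) (k : Nat) => s + ((k + 1 : Nat) : Int) * a.getD k 0) 0

theorem pvP_succ (a : List Int) (n : Nat) :
    pvP a (n + 1) = pvP a n + a.getD n 0 := by
  unfold pvP
  rw [List.take_add_one, List.sum_append]
  cases h : a[n]? <;> simp [List.getD, h]

theorem pvW_succ (a : List Int) (n : Nat) :
    pvW a (n + 1) = pvW a n + ((n : Int) + 1) * a.getD n 0 := by
  unfold pvW
  rw [List.range_succ, List.foldl_append]
  push_cast
  simp

-- A's inner loop, with the outer index generalised to an arbitrary c
theorem pvInner_eq (a : List Int) (n : Nat) (c init : Int) :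
    (PySem.List.pyRange 1 ((n : Int) + 1) 1).foldl
      (fun s k => s + (c - k + 1) * PySem.List.pyGetD a (k - 1) 0) init
      = init + (c + 1) * pvP a n - pvW a n := by
  induction n generalizing init with
  | zero => simp [pvP, pvW, PySem.List.pyRange_one_eq_nil]
  | succ n ih =>
    have hsplit : PySem.List.pyRange 1 ((n : Int) + 1 + 1) 1
        = PySem.List.pyRange 1 ((n : Int) + 1) 1 ++ [(n : Int) + 1] := by
      exact PySem.List.pyRange_one_succ_right (by omega : (1:Int) <= (n : Int) + 1)
    push_cast
    rw [hsplit, List.foldl_append, ih]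
    have hidx : ((n : Int) + 1 - 1) = ((n : Nat) : Int) := by omega
    simp only [List.foldl_cons, List.foldl_nil, hidx, PySem.List.pyGetD_natCast]
    rw [pvP_succ a n, pvW_succ]
    ring

-- the two scans for j agree
theorem pvJ_eq (a : List Int) (idx : Nat) (h : idx <= a.length) :
    pvWhileJ a idx = pvFindJ (a.drop idx) idx a.length := by
  rw [pvWhileJ]
  by_cases hlt : idx < a.length
  · have hdrop : a.drop idx = a[idx] :: a.drop (idx + 1) := by
      exact (List.drop_eq_getElem_cons hlt)
    have hget : PySem.List.pyGetD a (idx : Int) 0 = a[idx] := by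
      simp [PySem.List.pyGetD_natCast, List.getD, List.getElem?_eq_getElem hlt]
    rw [hdrop]
    by_cases hpos : a[idx] > 0
    · simp only [pvFindJ, hlt, dif_pos, hget, hpos, if_pos, if_neg (by omega : ¬ a[idx] <= 0)]
      exact pvJ_eq a (idx + 1) (by omega)
    · simp [pvFindJ, hlt, hget, hpos, (by omega : a[idx] <= 0)]
  · have hEq : idx = a.length := by omega
    simp [hEq, List.drop_length, pvFindJ]
termination_by a.length - idx
decreasing_by omega

theorem pvFindJ_ge (l : List Int) (idx m : Nat) (h : idx + l.length <= m) :
    idx <= pvFindJ l idx m := by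
  induction l generalizing idx with
  | nil => simpa [pvFindJ] using (by omega : idx <= m)
  | cons v rest ih =>
    simp only [pvFindJ]
    split
    · omega
    · have := ih (idx + 1) (by simp at h ⊢; omega)
      omega

-- main loop invariant
theorem pvMain (a : List Int) (a0 : Int) (j : Nat) (hj1 : 1 <= j) (n : Nat) (hn : n <= a.length) :
    (PySem.List.pyRange 1 ((n : Int) + 1) 1).foldl
      (fun st i =>
        let v := PySem.List.pyGetD a (i - 1) 0
        let p := st.1 + v
        let w := st.2.1 + i * v
        let best :=
          if i >= (j : Int) then
            (if (i + 1) * p - w > st.2.2 then (i + 1) * p - w else st.2.2)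
          else st.2.2
        (p, w, best)) ((0 : Int), (0 : Int), a0)
      = (pvP a n, pvW a n,
         (PySem.List.pyRange (j : Int) ((n : Int) + 1) 1).foldl
           (fun max_sum i =>
             let temp_sum := (PySem.List.pyRange 1 (i + 1) 1).foldl
               (fun s k => s + (i - k + 1) * PySem.List.pyGetD a (k - 1) 0) 0
             if temp_sum > max_sum then temp_sum else max_sum) a0) := by
  induction n with
  | zero =>
    have h1 : PySem.List.pyRange (1:Int) (((0:Nat):Int) + 1) 1 = [] :=
      PySem.List.pyRange_one_eq_nil (by omega)
    have h2 : PySem.List.pyRange (j:Int) (((0:Nat):Int) + 1) 1 = [] :=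
      PySem.List.pyRange_one_eq_nil (by exact_mod_cast hj1)
    rw [h1, h2]
    simp [pvP, pvW]
  | succ n ih =>
    have ih' := ih (by omega)
    have hsplitB : PySem.List.pyRange 1 (((n + 1 : Nat) : Int) + 1) 1
        = PySem.List.pyRange 1 ((n : Int) + 1) 1 ++ [(n : Int) + 1] := by
      push_cast
      exact PySem.List.pyRange_one_succ_right (by omega : (1:Int) <= (n : Int) + 1)
    rw [hsplitB, List.foldl_append, ih']
    simp only [List.foldl_cons, List.foldl_nil]
    have hidx : ((n : Int) + 1 - 1) = ((n : Nat) : Int) := by omega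
    rw [hidx, PySem.List.pyGetD_natCast]
    have hp : pvP a n + a.getD n 0 = pvP a (n + 1) := (pvP_succ a n).symm
    have hw : pvW a n + ((n : Int) + 1) * a.getD n 0 = pvW a (n + 1) := (pvW_succ a n).symm
    have htemp : (PySem.List.pyRange 1 (((n : Int) + 1) + 1) 1).foldl
        (fun s k => s + (((n : Int) + 1) - k + 1) * PySem.List.pyGetD a (k - 1) 0) 0
        = (((n : Int) + 1) + 1) * pvP a (n + 1) - pvW a (n + 1) := by
      have hh := pvInner_eq a (n + 1) ((n : Int) + 1) 0
      push_cast at hh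
      rw [hh]
      ring
    by_cases hj : j <= n + 1
    · have hsplitA : PySem.List.pyRange (j : Int) (((n + 1 : Nat) : Int) + 1) 1
          = PySem.List.pyRange (j : Int) ((n : Int) + 1) 1 ++ [(n : Int) + 1] := by
        push_cast
        exact PySem.List.pyRange_one_succ_right (by exact_mod_cast hj : (j : Int) <= (n : Int) + 1)
      rw [hsplitA, List.foldl_append]
      simp only [List.foldl_cons, List.foldl_nil]
      rw [if_pos (by exact_mod_cast hj : ((n : Int) + 1) >= (j : Int))]
      rw [hp, hw, htemp]
    · have hEmpty1 : PySem.List.pyRange (j : Int) (((n + 1 : Nat) : Int) + 1) 1 = [] := by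
        apply PySem.List.pyRange_one_eq_nil; omega
      have hEmpty2 : PySem.List.pyRange (j : Int) ((n : Int) + 1) 1 = [] := by
        apply PySem.List.pyRange_one_eq_nil; omega
      rw [hEmpty1, hEmpty2]
      simp only [List.foldl_nil]
      rw [if_neg (by push_cast; omega : ¬ ((n : Int) + 1 >= (j : Int)))]
      rw [hp, hw]

-- ===== VERDICT (by name: the statement is the Claim_ definition above) =====
theorem coefficientShift_spec : Claim_equal_coefficientShift := by
  intro arr _ hpre
  unfold Spec_coefficientShift coefficientShift coefficientShift_alt
  have hane : PySem.List.sorted arr (fun x => x) true ≠ [] := by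
    rw [Ne, PySem.List.sorted_eq_nil_iff]
    exact hpre
  generalize hgen : PySem.List.sorted arr (fun x => x) true = a at hane ⊢
  cases hget : PySem.List.pyGet? a 0 with
  | none => simp [hget]
  | some a0 =>
    simp only [hget]
    by_cases hle : a0 <= 0
    · simp [hle]
    · rw [if_neg hle, if_neg hle]
      obtain ⟨tail, hta⟩ : ∃ tail, a = a0 :: tail := by
        cases a with
        | nil => simp [PySem.List.pyGet?] at hget
        | cons x xs =>
          rw [PySem.List.pyGet?_zero] at hget
          simp at hget
          exact ⟨xs, by rw [hget]⟩
      have hj1 : 1 <= pvFindJ a 0 a.length := by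
        rw [hta]
        simp only [pvFindJ, if_neg (by omega : ¬ a0 <= 0)]
        exact pvFindJ_ge tail 1 (a0 :: tail).length (by simp; omega)
      have hJeq : pvWhileJ a 0 = pvFindJ a 0 a.length := by
        simpa using pvJ_eq a 0 (by omega)
      rw [hJeq, pvMain a a0 (pvFindJ a 0 a.length) hj1 a.length (le_refl _)]
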